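-- pv_equiv track=rewrite | github.com/vl3c/MatHud | static/client/utils/graph_layout.py | _assign_columns_by_subtree
-- ===== SOURCE A (Python) =====
-- from typing import Dict, List, Optional, Set, Tuple
--
-- def _assign_columns_by_subtree(
--     root: str,
--     children: Dict[str, List[str]],
--     subtree_size: Dict[str, int],
-- ) -> Dict[str, int]:
--     """Assign columns top-down with children spread proportionally."""
--     vertex_col: Dict[str, int] = {}
--     total_width = subtree_size.get(root, 1)
--
--     def assign(node: str, col_start: int, col_end: int) -> None:
--         vertex_col[node] = (col_start + col_end) // 2
--
--         node_children = children.get(node, [])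
--         if not node_children:
--             return
--
--         total_size = sum(subtree_size.get(c, 1) for c in node_children)
--         child_col = col_start
--
--         for child in node_children:
--             child_size = subtree_size.get(child, 1)
--             child_range = max(1, (col_end - col_start) * child_size // max(total_size, 1))
--             child_col_end = min(child_col + child_range, col_end)
--             assign(child, child_col, child_col_end)
--             child_col = child_col_end
--
--     assign(root, 0, total_width)
--     return vertex_col
-- ===== SOURCE B (Python) =====
-- def _assign_columns_by_subtree(root, children, subtree_size):
--     """Assign columns top-down with children spread proportionally (explicit stack)."""
--     vertex_col = {}
--     stack = [(root, 0, subtree_size.get(root, 1))]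
--     while stack:
--         node, col_start, col_end = stack.pop()
--         vertex_col[node] = (col_start + col_end) // 2
--         node_children = children.get(node, [])
--         if not node_children:
--             continue
--         total_size = sum(subtree_size.get(c, 1) for c in node_children)
--         frames = []
--         child_col = col_start
--         for child in node_children:
--             child_size = subtree_size.get(child, 1)
--             child_range = max(1, (col_end - col_start) * child_size // max(total_size, 1))
--             child_col_end = min(child_col + child_range, col_end)
--             frames.append((child, child_col, child_col_end))
--             child_col = child_col_end
--         stack.extend(reversed(frames))
--     return vertex_col
-- ===== Notes on version B (the rewrite author's own statement) =====
-- stated objective: alternative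
-- what changed: Replaces A's recursive nested closure mutating a shared dict with an explicit worklist loop: a stack of (node, col_start, col_end) frames is popped in LIFO order (children pushed reversed), reproducing A's preorder assignment without recursion.
import Mathlib
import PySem

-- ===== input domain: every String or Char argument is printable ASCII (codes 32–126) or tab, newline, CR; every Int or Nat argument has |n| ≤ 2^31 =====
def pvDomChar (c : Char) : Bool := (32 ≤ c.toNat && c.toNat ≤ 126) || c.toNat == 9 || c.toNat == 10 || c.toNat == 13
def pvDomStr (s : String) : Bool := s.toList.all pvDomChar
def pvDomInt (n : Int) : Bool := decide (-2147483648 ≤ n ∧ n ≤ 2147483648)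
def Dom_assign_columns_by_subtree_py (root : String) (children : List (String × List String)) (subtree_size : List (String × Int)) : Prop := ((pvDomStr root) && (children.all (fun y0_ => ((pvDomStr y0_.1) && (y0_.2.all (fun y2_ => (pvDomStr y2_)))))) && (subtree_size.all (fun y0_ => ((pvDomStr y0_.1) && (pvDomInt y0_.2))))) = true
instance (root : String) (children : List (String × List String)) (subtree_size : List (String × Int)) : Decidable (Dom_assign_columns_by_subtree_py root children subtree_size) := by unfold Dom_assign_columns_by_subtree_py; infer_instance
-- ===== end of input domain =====

-- B replaces A's recursive closure over a shared dict by an explicit worklist (stack) loop; objective: alternative decomposition, same cost.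
-- Both ports carry a Lean-only depth fuel (one slot per stack frame) as a totality guard; on Pre_ inputs (no cycle
-- reachable from the root) the fuel 1 + total number of child occurrences is never exhausted, so the ports are
-- faithful to their Pythons there.

-- children.get(node, []) : first-match lookup in the association list
def pvGetChildren (children : List (String × List String)) (node : String) : List String :=
  (PySem.Dict.mk children).getD node []

-- subtree_size.get(c, 1)
def pvSizeOf (subtree_size : List (String × Int)) (c : String) : Int :=
  (PySem.Dict.mk subtree_size).getD c 1

-- ===== PORT A =====
-- the nested closure `assign` (fuel : Lean-only totality guard, decremented per recursion depth);
-- the inner `for child in node_children` loop is pvAssignChildrenA, threading (child_col, vertex_col).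
mutual
def pvAssignA (children : List (String × List String)) (subtree_size : List (String × Int)) :
    Nat → String → Int → Int → PySem.Dict String Int → PySem.Dict String Int
  | 0, _, _, _, vc => vc
  | Nat.succ fuel, node, cs, ce, vc =>
    let vc := vc.insert node (PySem.Int.floordiv (cs + ce) 2)
    let ncs := pvGetChildren children node
    if ncs.isEmpty then vc
    else
      let total := (ncs.map (fun c => pvSizeOf subtree_size c)).sum
      pvAssignChildrenA children subtree_size fuel cs ce total ncs cs vc
termination_by fuel _ _ _ _ => (fuel, 0, 0)

def pvAssignChildrenA (children : List (String × List String)) (subtree_size : List (String × Int)) :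
    Nat → Int → Int → Int → List String → Int → PySem.Dict String Int → PySem.Dict String Int
  | _, _, _, _, [], _, vc => vc
  | fuel, cs, ce, total, child :: rest, ccol, vc =>
    let csize := pvSizeOf subtree_size child
    let crange := max 1 (PySem.Int.floordiv ((ce - cs) * csize) (max total 1))
    let cce := min (ccol + crange) ce
    pvAssignChildrenA children subtree_size fuel cs ce total rest cce
      (pvAssignA children subtree_size fuel child ccol cce vc)
termination_by fuel _ _ _ l _ _ => (fuel, 1, l.length)
end

def assign_columns_by_subtree_py (root : String) (children : List (String × List String)) (subtree_size : List (String × Int)) : List (String × Int) :=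
  let total_width := pvSizeOf subtree_size root
  (pvAssignA children subtree_size ((children.map Prod.snd).flatten.length + 1) root 0 total_width PySem.Dict.empty).items

-- ===== PORT B =====
-- the `for child in node_children` loop of Source B building `frames`:
def pvFramesB (subtree_size : List (String × Int)) (cs ce total : Int) (fuel : Nat) :
    List String → Int → List (String × Int × Int × Nat)
  | [], _ => []
  | child :: rest, ccol =>
    let csize := pvSizeOf subtree_size child
    let crange := max 1 (PySem.Int.floordiv ((ce - cs) * csize) (max total 1))
    let cce := min (ccol + crange) ce
    (child, ccol, cce, fuel) :: pvFramesB subtree_size cs ce total fuel rest cce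

-- facts the termination measure of the stack loop needs (cited in its decreasing_by)
lemma pvFramesB_fuel (subtree_size : List (String × Int)) (cs ce total : Int) (fuel : Nat)
    (ncs : List String) (ccol : Int) :
    ∀ e ∈ pvFramesB subtree_size cs ce total fuel ncs ccol, e.2.2.2 = fuel := by
  induction ncs generalizing ccol with
  | nil => simp [pvFramesB]
  | cons c rest ih =>
    simp only [pvFramesB, List.mem_cons]
    rintro e (rfl | h)
    · rfl
    · exact ih _ _ h

lemma pvFramesB_length (subtree_size : List (String × Int)) (cs ce total : Int) (fuel : Nat)
    (ncs : List String) (ccol : Int) :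
    (pvFramesB subtree_size cs ce total fuel ncs ccol).length = ncs.length := by
  induction ncs generalizing ccol with
  | nil => rfl
  | cons c rest ih => simp [pvFramesB, ih]

lemma pvGetChildren_length_le (children : List (String × List String)) (node : String) :
    (pvGetChildren children node).length ≤ ((children.map Prod.snd).flatten).length := by
  induction children with
  | nil => simp [pvGetChildren, PySem.Dict.getD, PySem.Dict.get?]
  | cons p rest ih =>
    obtain ⟨k, l⟩ := p
    simp only [pvGetChildren, PySem.Dict.getD] at ih ⊢
    rw [PySem.Dict.get?_mk_cons]
    by_cases h : (k == node) = true
    · simp [h]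
    · simp only [h, if_neg, Bool.false_eq_true, not_false_iff]
      simp only [List.map_cons, List.flatten_cons, List.length_append]
      omega

lemma pvFrames_measure_lt (children : List (String × List String)) (subtree_size : List (String × Int))
    (cs ce total : Int) (fuel : Nat) (node : String) (ccol : Int) :
    ((pvFramesB subtree_size cs ce total fuel (pvGetChildren children node) ccol).map
        (fun e => ((children.map Prod.snd).flatten.length + 1) ^ e.2.2.2)).sum
      < ((children.map Prod.snd).flatten.length + 1) ^ (fuel + 1) := by
  set E := ((children.map Prod.snd).flatten).length with hE
  set fr := pvFramesB subtree_size cs ce total fuel (pvGetChildren children node) ccol with hfr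
  have hmap : fr.map (fun e => (E + 1) ^ e.2.2.2) = List.replicate fr.length ((E + 1) ^ fuel) := by
    have h1 : ∀ b ∈ fr.map (fun e => (E + 1) ^ e.2.2.2), b = (E + 1) ^ fuel := by
      intro x hx
      obtain ⟨e, he, rfl⟩ := List.mem_map.1 hx
      rw [pvFramesB_fuel subtree_size cs ce total fuel _ ccol e he]
    have h2 := List.eq_replicate_of_mem h1
    rw [List.length_map] at h2
    exact h2
  rw [hmap, List.sum_replicate, smul_eq_mul]
  have hlen : fr.length ≤ E := by
    rw [hfr, pvFramesB_length]
    exact pvGetChildren_length_le children node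
  calc fr.length * (E + 1) ^ fuel ≤ E * (E + 1) ^ fuel :=
        Nat.mul_le_mul_right _ hlen
    _ < (E + 1) * (E + 1) ^ fuel :=
        Nat.mul_lt_mul_of_pos_right (Nat.lt_succ_self E) (Nat.pow_pos (by omega))
    _ = (E + 1) ^ (fuel + 1) := by ring

-- the while-stack loop of Source B (top of the Python stack = head of the list; Source B extends with
-- reversed(frames) and pops from the end, which is frames ++ rest popped from the head here);
-- an entry with exhausted fuel is skipped (Lean-only totality guard, never reached on Pre_ inputs)
def pvLoopB (children : List (String × List String)) (subtree_size : List (String × Int)) :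
    List (String × Int × Int × Nat) → PySem.Dict String Int → PySem.Dict String Int
  | [], vc => vc
  | (_, _, _, 0) :: rest, vc => pvLoopB children subtree_size rest vc
  | (node, cs, ce, Nat.succ fuel) :: rest, vc =>
    let vc := vc.insert node (PySem.Int.floordiv (cs + ce) 2)
    let ncs := pvGetChildren children node
    if ncs.isEmpty then pvLoopB children subtree_size rest vc
    else
      let total := (ncs.map (fun c => pvSizeOf subtree_size c)).sum
      pvLoopB children subtree_size
        (pvFramesB subtree_size cs ce total fuel ncs cs ++ rest) vc
termination_by stack _ => (stack.map (fun e => ((children.map Prod.snd).flatten.length + 1) ^ e.2.2.2)).sum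
decreasing_by
  · simp only [List.map_cons, List.sum_cons, pow_zero]
    omega
  · simp only [List.map_cons, List.sum_cons, Nat.succ_eq_add_one]
    have : 0 < ((children.map Prod.snd).flatten.length + 1) ^ (fuel + 1) :=
      Nat.pow_pos (by omega)
    omega
  · simp only [List.map_cons, List.sum_cons, List.map_append, List.sum_append,
      Nat.succ_eq_add_one]
    have := pvFrames_measure_lt children subtree_size cs ce
      ((pvGetChildren children node).map (fun c => pvSizeOf subtree_size c)).sum fuel node cs
    omega

def assign_columns_by_subtree_py_alt (root : String) (children : List (String × List String)) (subtree_size : List (String × Int)) : List (String × Int) :=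
  let total_width := pvSizeOf subtree_size root
  (pvLoopB children subtree_size
      [(root, 0, total_width, (children.map Prod.snd).flatten.length + 1)] PySem.Dict.empty).items

-- ===== PRECONDITION & SPEC =====
-- one step of child-reachability in the input graph (deduplicated)
def pvReachStep (children : List (String × List String)) (s : List String) : List String :=
  PySem.Set.ofList (s.flatMap (fun n => pvGetChildren children n))

-- Pre_: no cycle in the children map is reachable from root (equivalently: no child-chain of
-- children.length + 1 edges starts at root). On inputs with a reachable cycle the Python A raises
-- RecursionError (and B does not terminate); everywhere A returns, Pre_ holds.
def Pre_assign_columns_by_subtree_py (root : String) (children : List (String × List String)) (subtree_size : List (String × Int)) : Prop :=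
  (pvReachStep children)^[children.length + 1] [root] = []
instance (root : String) (children : List (String × List String)) (subtree_size : List (String × Int)) : Decidable (Pre_assign_columns_by_subtree_py root children subtree_size) := by unfold Pre_assign_columns_by_subtree_py; infer_instance

def pvWitness_assign_columns_by_subtree_py : String × (List (String × List String)) × (List (String × Int)) :=
  ("r", [("r", ["a", "b"]), ("a", ["c"])], [("r", 4), ("a", 2), ("b", 1), ("c", 1)])

def Spec_assign_columns_by_subtree_py (root : String) (children : List (String × List String)) (subtree_size : List (String × Int)) (out : List (String × Int)) : Prop := out = assign_columns_by_subtree_py_alt root children subtree_size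
instance (root : String) (children : List (String × List String)) (subtree_size : List (String × Int)) (out : List (String × Int)) : Decidable (Spec_assign_columns_by_subtree_py root children subtree_size out) := by unfold Spec_assign_columns_by_subtree_py; infer_instance

-- ===== CLAIM (what is proved, stated in full; the proofs are below) =====
def Claim_equal_assign_columns_by_subtree_py : Prop := ∀ (root : String) (children : List (String × List String)) (subtree_size : List (String × Int)), Dom_assign_columns_by_subtree_py root children subtree_size → Pre_assign_columns_by_subtree_py root children subtree_size → Spec_assign_columns_by_subtree_py root children subtree_size (assign_columns_by_subtree_py root children subtree_size)

-- ===== LEMMAS AND PROOFS =====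

-- processing the frames of one parent on the stack = A's sequential child loop
lemma pvLoop_frames (children : List (String × List String)) (subtree_size : List (String × Int))
    (fuel : Nat)
    (hL : ∀ (node : String) (cs ce : Int) (rest : List (String × Int × Int × Nat))
        (vc : PySem.Dict String Int),
        pvLoopB children subtree_size ((node, cs, ce, fuel) :: rest) vc =
          pvLoopB children subtree_size rest (pvAssignA children subtree_size fuel node cs ce vc)) :
    ∀ (ncs : List String) (cs ce total ccol : Int) (rest : List (String × Int × Int × Nat))
      (vc : PySem.Dict String Int),
      pvLoopB children subtree_size (pvFramesB subtree_size cs ce total fuel ncs ccol ++ rest) vc =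
        pvLoopB children subtree_size rest
          (pvAssignChildrenA children subtree_size fuel cs ce total ncs ccol vc) := by
  intro ncs
  induction ncs with
  | nil => intro cs ce total ccol rest vc; simp [pvFramesB, pvAssignChildrenA]
  | cons c rest' ih =>
    intro cs ce total ccol rest vc
    rw [pvFramesB, pvAssignChildrenA]
    simp only [List.cons_append]
    rw [hL]
    exact ih cs ce total _ rest _

-- the head stack entry is processed exactly as A's recursive `assign`
lemma pvLoop_assign (children : List (String × List String)) (subtree_size : List (String × Int)) :
    ∀ (fuel : Nat) (node : String) (cs ce : Int) (rest : List (String × Int × Int × Nat))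
      (vc : PySem.Dict String Int),
      pvLoopB children subtree_size ((node, cs, ce, fuel) :: rest) vc =
        pvLoopB children subtree_size rest (pvAssignA children subtree_size fuel node cs ce vc) := by
  intro fuel
  induction fuel with
  | zero => intro node cs ce rest vc; rw [pvLoopB, pvAssignA]
  | succ f ih =>
    intro node cs ce rest vc
    rw [pvLoopB, pvAssignA]
    by_cases h : (pvGetChildren children node).isEmpty
    · simp only [h, if_true]
    · simp only [h, if_false, Bool.false_eq_true]
      exact pvLoop_frames children subtree_size f ih _ _ _ _ _ _ _

-- ===== VERDICT (by name: the statement is the Claim_ definition above) =====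
theorem assign_columns_by_subtree_py_spec : Claim_equal_assign_columns_by_subtree_py := by
  intro root children subtree_size _ _
  unfold Spec_assign_columns_by_subtree_py
  unfold assign_columns_by_subtree_py assign_columns_by_subtree_py_alt
  show (pvAssignA children subtree_size ((children.map Prod.snd).flatten.length + 1) root 0
      (pvSizeOf subtree_size root) PySem.Dict.empty).items =
    (pvLoopB children subtree_size
      [(root, 0, pvSizeOf subtree_size root, (children.map Prod.snd).flatten.length + 1)]
      PySem.Dict.empty).items
  rw [pvLoop_assign, pvLoopB]
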